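-- pv_equiv track=rewrite | github.com/zekrowm/transit_planning_with_python | scripts/gtfs_exports/stop_pattern_exporter.py | forward_match_pattern_to_master
-- ===== SOURCE A (Python) =====
-- from typing import Any, Dict, List, Literal, Mapping, Optional, Sequence, Tuple, cast
--
-- def forward_match_pattern_to_master(
--     pattern_stops: List[Tuple[str, str]], master_stops: List[Tuple[str, str]]
-- ) -> List[str]:
--     """Align pattern segment distances to the master stop order.
--
--     Args:
--         pattern_stops: List of (stop_id, dist_str) tuples from a pattern.
--         master_stops: List of (stop_id, stop_name) from master trip.
--
--     Returns:
--         List of distances aligned to master_stops.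
--     """
--     result = [""] * len(master_stops)
--     i = 0  # master_stops index
--     j = 0  # pattern_stops index
--
--     # The first stop of a pattern conceptually has no preceding segment *within that pattern*.
--     # Its distance value in pattern_stops (e.g., "-") should be placed.
--     # If pattern_stops[0] is ("stop_A", "-"), and master_stops[0] is ("stop_A", "Stop A Name"),
--     # then result[0] should be "-".
--
--     while i < len(master_stops) and j < len(pattern_stops):
--         master_sid = master_stops[i][0]
--         pat_sid, dist_str = pattern_stops[j]
--
--         if master_sid == pat_sid:
--             result[i] = dist_str  # Place the distance string from the pattern
--             i += 1
--             j += 1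
--         else:
--             i += 1
--     return result
-- ===== SOURCE B (Python) =====
-- def forward_match_pattern_to_master(pattern_stops, master_stops):
--     """Align pattern segment distances to the master stop order.
--
--     Strategy: build an index stop_id -> sorted list of master positions once,
--     then for each pattern stop binary-search that occurrence list for the
--     first position at or after the cursor (classic subsequence matching
--     with a precomputed occurrence index)."""
--     positions = {}
--     idx = 0
--     for sid, _name in master_stops:
--         positions[sid] = positions.get(sid, []) + [idx]
--         idx += 1
--     result = [""] * len(master_stops)
--     cursor = 0
--     for sid, dist in pattern_stops:
--         occ = positions.get(sid, [])
--         lo, hi = 0, len(occ)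
--         while lo < hi:  # hand-rolled bisect_left(occ, cursor)
--             mid = (lo + hi) // 2
--             if occ[mid] < cursor:
--                 lo = mid + 1
--             else:
--                 hi = mid
--         if lo == len(occ):
--             break
--         p = occ[lo]
--         result[p] = dist
--         cursor = p + 1
--     return result
-- ===== Notes on version B (the rewrite author's own statement) =====
-- stated objective: alternative
-- what changed: Replaces A's single interleaved two-pointer scan over both lists with a staged algorithm: first build a stop_id -> sorted occurrence-position index of the master list, then for each pattern stop binary-search that occurrence list for the first position at or after a cursor.
import Mathlib
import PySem

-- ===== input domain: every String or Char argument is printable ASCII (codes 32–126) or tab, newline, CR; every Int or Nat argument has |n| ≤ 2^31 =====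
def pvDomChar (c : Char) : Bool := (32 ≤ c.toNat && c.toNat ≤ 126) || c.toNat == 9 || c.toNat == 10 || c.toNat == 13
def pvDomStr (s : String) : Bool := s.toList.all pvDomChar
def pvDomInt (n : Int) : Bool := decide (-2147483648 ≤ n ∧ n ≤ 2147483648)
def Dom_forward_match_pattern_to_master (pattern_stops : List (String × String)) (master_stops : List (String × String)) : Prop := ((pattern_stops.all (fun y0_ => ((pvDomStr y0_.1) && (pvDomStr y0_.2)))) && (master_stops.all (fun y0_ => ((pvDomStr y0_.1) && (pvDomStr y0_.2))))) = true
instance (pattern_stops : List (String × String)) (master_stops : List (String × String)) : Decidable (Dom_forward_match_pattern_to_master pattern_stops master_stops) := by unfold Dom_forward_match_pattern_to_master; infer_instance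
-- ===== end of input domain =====

-- B replaces A's interleaved two-pointer scan with a precomputed stop_id -> occurrence-position
-- index of the master list plus a binary search from a cursor (objective: alternative algorithm).


-- ===== PORT A =====
-- A's while loop over the two indices i (master) and j (pattern), mutating result in place
def pvLoopA (pattern_stops master_stops : List (String × String))
    (result : List String) (i j : Nat) : List String :=
  if h : i < master_stops.length ∧ j < pattern_stops.length then
    let master_sid := (master_stops[i]'h.1).1
    let pat := pattern_stops[j]'h.2
    if master_sid == pat.1 then
      pvLoopA pattern_stops master_stops (result.set i pat.2) (i + 1) (j + 1)
    else
      pvLoopA pattern_stops master_stops result (i + 1) j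
  else
    result
termination_by master_stops.length - i

def forward_match_pattern_to_master (pattern_stops : List (String × String)) (master_stops : List (String × String)) : List String :=
  pvLoopA pattern_stops master_stops (List.replicate master_stops.length "") 0 0

-- ===== PORT B =====
-- B stage 1: positions[sid] = positions.get(sid, []) + [idx] for each master stop, idx counting up
def pvIndexLoop : List (String × String) → PySem.Dict String (List Nat) × Nat → PySem.Dict String (List Nat) × Nat
  | [], st => st
  | (sid, _) :: rest, (d, idx) => pvIndexLoop rest (d.modify sid [] (· ++ [idx]), idx + 1)

-- B's hand-rolled bisect_left while loop (occ[mid] is in range whenever lo < hi ≤ len, so getD is exact)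
def pvBsearch (occ : List Nat) (x : Nat) (lo hi : Nat) : Nat :=
  if lo < hi then
    let mid := (lo + hi) / 2
    if occ.getD mid 0 < x then pvBsearch occ x (mid + 1) hi
    else pvBsearch occ x lo mid
  else lo
termination_by hi - lo

-- B stage 2: for each pattern stop, binary-search its occurrence list for the first position ≥ cursor
def pvPatLoop (positions : PySem.Dict String (List Nat)) :
    List (String × String) → List String → Nat → List String
  | [], result, _ => result
  | (sid, dist) :: rest, result, cursor =>
    let occ := positions.getD sid []
    let lo := pvBsearch occ cursor 0 occ.length
    if lo = occ.length then result
    else pvPatLoop positions rest (result.set (occ.getD lo 0) dist) (occ.getD lo 0 + 1)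

def forward_match_pattern_to_master_alt (pattern_stops : List (String × String)) (master_stops : List (String × String)) : List String :=
  pvPatLoop (pvIndexLoop master_stops (PySem.Dict.empty, 0)).1 pattern_stops
    (List.replicate master_stops.length "") 0

-- ===== PRECONDITION & SPEC =====
def Spec_forward_match_pattern_to_master (pattern_stops : List (String × String)) (master_stops : List (String × String)) (out : List String) : Prop := out = forward_match_pattern_to_master_alt pattern_stops master_stops
instance (pattern_stops : List (String × String)) (master_stops : List (String × String)) (out : List String) : Decidable (Spec_forward_match_pattern_to_master pattern_stops master_stops out) := by unfold Spec_forward_match_pattern_to_master; infer_instance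

-- ===== CLAIM (what is proved, stated in full; the proofs are below) =====
def Claim_equal_forward_match_pattern_to_master : Prop := ∀ (pattern_stops : List (String × String)) (master_stops : List (String × String)), Dom_forward_match_pattern_to_master pattern_stops master_stops → Spec_forward_match_pattern_to_master pattern_stops master_stops (forward_match_pattern_to_master pattern_stops master_stops)

-- ===== LEMMAS AND PROOFS =====

-- Abstract step both loops are proved against: first master index ≥ i whose stop_id is sid
def pvFindFrom (master_ids : List String) (sid : String) (i : Nat) : Option Nat :=
  (PySem.List.index? (master_ids.drop i) sid).map (· + i)

-- Abstract loop: repeatedly place at the found position, advance the cursor past it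
def pvLoopFind (master_ids : List String) (result : List String) (i : Nat) :
    List (String × String) → List String
  | [] => result
  | (sid, d) :: rest =>
    match pvFindFrom master_ids sid i with
    | none => result
    | some p => pvLoopFind master_ids (result.set p d) (p + 1) rest

-- ---- A's loop equals the abstract loop ----

theorem pvFindFrom_succ (ids : List String) (sid : String) (i : Nat)
    (hi : i < ids.length) (hne : ids[i] ≠ sid) :
    pvFindFrom ids sid i = pvFindFrom ids sid (i + 1) := by
  unfold pvFindFrom
  rw [List.drop_eq_getElem_cons hi, PySem.List.index?_cons_of_ne _ hne]
  cases PySem.List.index? (ids.drop (i + 1)) sid with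
  | none => simp
  | some k => simp; omega

theorem pvFindFrom_self (ids : List String) (i : Nat)
    (hi : i < ids.length) :
    pvFindFrom ids ids[i] i = some i := by
  unfold pvFindFrom
  rw [List.drop_eq_getElem_cons hi, PySem.List.index?_cons_self]
  simp

theorem pvLoopA_eq_find (pattern_stops master_stops : List (String × String))
    (result : List String) (i j : Nat) :
    pvLoopA pattern_stops master_stops result i j
      = pvLoopFind (master_stops.map Prod.fst) result i (pattern_stops.drop j) := by
  by_cases hi : i < master_stops.length
  · by_cases hj : j < pattern_stops.length
    · rw [pvLoopA, dif_pos ⟨hi, hj⟩]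
      rw [List.drop_eq_getElem_cons hj]
      rcases hp : pattern_stops[j]'hj with ⟨sid, d⟩
      by_cases heq : (master_stops[i]'hi).1 = sid
      · rw [if_pos (by simp [heq])]
        rw [pvLoopA_eq_find pattern_stops master_stops _ (i + 1) (j + 1)]
        have : pvFindFrom (master_stops.map Prod.fst) sid i = some i := by
          have := pvFindFrom_self (master_stops.map Prod.fst) i (by simpa using hi)
          simpa [heq] using this
        simp [pvLoopFind, this]
      · rw [if_neg (by simp [heq])]
        rw [pvLoopA_eq_find pattern_stops master_stops result (i + 1) j]
        rw [List.drop_eq_getElem_cons hj]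
        have hstep : pvFindFrom (master_stops.map Prod.fst) sid i
            = pvFindFrom (master_stops.map Prod.fst) sid (i + 1) := by
          apply pvFindFrom_succ _ _ _ (by simpa using hi)
          simpa using heq
        rw [hp]
        simp only [pvLoopFind, hstep]
    · rw [pvLoopA, dif_neg (by omega)]
      rw [List.drop_eq_nil_of_le (by omega)]
      rfl
  · rw [pvLoopA, dif_neg (by omega)]
    cases hd : pattern_stops.drop j with
    | nil => rfl
    | cons p rest =>
      obtain ⟨sid, d⟩ := p
      have : pvFindFrom (master_stops.map Prod.fst) sid i = none := by
        unfold pvFindFrom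
        rw [List.drop_eq_nil_of_le (by simpa using Nat.le_of_not_lt hi)]
        simp [PySem.List.index?]
      simp [pvLoopFind, this]
termination_by master_stops.length - i

-- ---- the occurrence index ----

-- proof-side spec of one occurrence list: positions (offset k) of sid in ids
def pvOccF (ids : List String) (sid : String) (k : Nat) : List Nat :=
  match ids with
  | [] => []
  | x :: xs => (if x = sid then [k] else []) ++ pvOccF xs sid (k + 1)

theorem pvIndexLoop_getD (master : List (String × String))
    (d : PySem.Dict String (List Nat)) (k : Nat) (sid : String) :
    ((pvIndexLoop master (d, k)).1).getD sid []
      = d.getD sid [] ++ pvOccF (master.map Prod.fst) sid k := by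
  induction master generalizing d k with
  | nil => simp [pvIndexLoop, pvOccF]
  | cons hd tl ih =>
    obtain ⟨x, name⟩ := hd
    rw [pvIndexLoop, ih, PySem.Dict.getD_modify]
    by_cases hx : sid = x
    · subst hx
      simp [pvOccF]
    · have hx' : ¬ x = sid := fun h => hx h.symm
      simp [pvOccF, hx, hx']

theorem pvOccF_mem (ids : List String) (sid : String) (k p : Nat) :
    p ∈ pvOccF ids sid k ↔ ∃ j, ∃ h : j < ids.length, p = k + j ∧ ids[j] = sid := by
  induction ids generalizing k with
  | nil => simp [pvOccF]
  | cons x xs ih =>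
    simp only [pvOccF, List.mem_append]
    constructor
    · rintro (hp | hp)
      · refine ⟨0, by simp, ?_⟩
        by_cases hx : x = sid <;> simp [hx] at hp ⊢
        omega
      · obtain ⟨j, hj, hpj, hsid⟩ := (ih (k + 1)).1 hp
        exact ⟨j + 1, by simpa using hj, by omega, by simpa using hsid⟩
    · rintro ⟨j, hj, hpj, hsid⟩
      cases j with
      | zero => left; simp_all
      | succ j' =>
        right
        refine (ih (k + 1)).2 ⟨j', by simpa using hj, by omega, by simpa using hsid⟩

theorem pvOccF_lb (ids : List String) (sid : String) (k p : Nat) (hp : p ∈ pvOccF ids sid k) :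
    k ≤ p := by
  obtain ⟨j, hj, hpj, _⟩ := (pvOccF_mem ids sid k p).1 hp
  omega

theorem pvOccF_sorted (ids : List String) (sid : String) (k : Nat) :
    (pvOccF ids sid k).Pairwise (· < ·) := by
  induction ids generalizing k with
  | nil => simp [pvOccF]
  | cons x xs ih =>
    simp only [pvOccF]
    rw [List.pairwise_append]
    refine ⟨?_, ?_, ?_⟩
    · by_cases hx : x = sid <;> simp [hx]
    · exact ih (k + 1)
    · intro a ha b hb
      by_cases hx : x = sid <;> simp [hx] at ha
      have := pvOccF_lb xs sid (k + 1) b hb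
      omega

-- ---- binary search ----

theorem pvBsearch_spec (occ : List Nat) (x lo hi : Nat)
    (hhi : hi ≤ occ.length) (hlohi : lo ≤ hi)
    (hmono : ∀ i j, i ≤ j → j < occ.length → occ.getD i 0 ≤ occ.getD j 0)
    (hlow : ∀ j, j < lo → occ.getD j 0 < x)
    (hhigh : ∀ j, hi ≤ j → j < occ.length → x ≤ occ.getD j 0) :
    lo ≤ pvBsearch occ x lo hi ∧ pvBsearch occ x lo hi ≤ hi ∧
      (∀ j, j < pvBsearch occ x lo hi → occ.getD j 0 < x) ∧
      (∀ j, pvBsearch occ x lo hi ≤ j → j < occ.length → x ≤ occ.getD j 0) := by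
  by_cases h : lo < hi
  · rw [pvBsearch, if_pos h]
    set mid := (lo + hi) / 2 with hmid
    by_cases hc : occ.getD mid 0 < x
    · rw [if_pos hc]
      have := pvBsearch_spec occ x (mid + 1) hi hhi (by omega) hmono
        (fun j hj => lt_of_le_of_lt (hmono j mid (by omega) (by omega)) hc) hhigh
      exact ⟨by omega, this.2.1, this.2.2.1, this.2.2.2⟩
    · rw [if_neg hc]
      have := pvBsearch_spec occ x lo mid (by omega) (by omega) hmono hlow
        (fun j hj hjl => le_trans (Nat.le_of_not_lt hc) (hmono mid j hj hjl))
      exact ⟨this.1, by omega, this.2.2.1, this.2.2.2⟩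
  · rw [pvBsearch, if_neg h]
    have : lo = hi := by omega
    subst this
    exact ⟨le_rfl, le_rfl, hlow, fun j hj hjl => hhigh j hj hjl⟩
termination_by hi - lo

-- ---- B's per-pattern-stop step computes pvFindFrom ----

-- helper: index? = some of a position that matches and has no earlier match
theorem pvIndex?_eq_some (xs : List String) (v : String) (n : Nat) (hn : n < xs.length)
    (hv : xs[n] = v) (hmin : ∀ m, ∀ h : m < n, xs[m]'(by omega) ≠ v) :
    PySem.List.index? xs v = some n := by
  have hmem : v ∈ xs := hv ▸ List.getElem_mem hn
  obtain ⟨n', hn'⟩ := Option.isSome_iff_exists.1 ((PySem.List.index?_isSome_iff xs v).2 hmem)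
  obtain ⟨hn'l, hvn', hmin'⟩ := PySem.List.getElem_of_index?_eq_some hn'
  have : n' = n := by
    by_contra hne
    rcases Nat.lt_or_ge n' n with hlt | hge
    · exact hmin n' hlt hvn'
    · exact hmin' n (by omega) hv
  rw [hn', this]

theorem pvStep_eq_find (master : List (String × String)) (sid : String) (cursor : Nat) :
    (let occ := ((pvIndexLoop master (PySem.Dict.empty, 0)).1).getD sid []
     let lo := pvBsearch occ cursor 0 occ.length
     if lo = occ.length then (none : Option Nat) else some (occ.getD lo 0))
      = pvFindFrom (master.map Prod.fst) sid cursor := by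
  set ids := master.map Prod.fst with hids
  have hocc : ((pvIndexLoop master (PySem.Dict.empty, 0)).1).getD sid [] = pvOccF ids sid 0 := by
    rw [pvIndexLoop_getD]; simp [hids]
  simp only [hocc]
  set occ := pvOccF ids sid 0 with hoccdef
  have hsorted := pvOccF_sorted ids sid 0
  have hpair := (List.pairwise_iff_getElem (R := (· < ·)) (l := occ)).1 hsorted
  have hmono : ∀ i j, i ≤ j → j < occ.length → occ.getD i 0 ≤ occ.getD j 0 := by
    intro i j hij hjl
    rcases Nat.eq_or_lt_of_le hij with rfl | hlt
    · exact le_rfl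
    · have := hpair i j (by omega) hjl hlt
      rw [List.getD_eq_getElem _ _ (by omega), List.getD_eq_getElem _ _ hjl]
      omega
  have hspec := pvBsearch_spec occ cursor 0 occ.length le_rfl (by omega) hmono
    (by omega) (by omega)
  set lo := pvBsearch occ cursor 0 occ.length with hlodef
  by_cases hlo : lo = occ.length
  · rw [if_pos hlo]
    -- every occurrence is < cursor, so sid ∉ ids.drop cursor
    have hnone : sid ∉ ids.drop cursor := by
      intro hmem
      obtain ⟨m, hm, hvm⟩ := List.mem_iff_getElem.1 hmem
      have hml : cursor + m < ids.length := by
        have := List.length_drop (l := ids) (i := cursor); omega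
      have : (cursor + m) ∈ occ := by
        rw [hoccdef, pvOccF_mem]
        refine ⟨cursor + m, hml, by omega, ?_⟩
        rw [List.getElem_drop] at hvm
        exact hvm
      obtain ⟨r, hr, hvr⟩ := List.mem_iff_getElem.1 this
      have := hspec.2.2.1 r (by omega)
      rw [List.getD_eq_getElem _ _ hr, hvr] at this
      omega
    unfold pvFindFrom
    rw [(PySem.List.index?_eq_none_iff _ _).2 hnone]
    rfl
  · rw [if_neg hlo]
    have hlol : lo < occ.length := by omega
    set p := occ.getD lo 0 with hpdef
    have hpocc : p ∈ occ := by
      rw [hpdef, List.getD_eq_getElem _ _ hlol]; exact List.getElem_mem hlol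
    obtain ⟨j, hj, hpj, hsidj⟩ := (pvOccF_mem ids sid 0 p).1 (hoccdef ▸ hpocc)
    have hpj' : p = j := by omega
    have hpc : cursor ≤ p := by
      have := hspec.2.2.2 lo le_rfl hlol
      omega
    -- p is the first index ≥ cursor with ids[p] = sid
    unfold pvFindFrom
    have hdl : (ids.drop cursor).length = ids.length - cursor := List.length_drop
    have hidx : PySem.List.index? (ids.drop cursor) sid = some (p - cursor) := by
      refine pvIndex?_eq_some _ _ _ (by omega) ?_ ?_
      · rw [List.getElem_drop]
        have : cursor + (p - cursor) = j := by omega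
        simp only [this]; exact hsidj
      · intro m hm hvm
        rw [List.getElem_drop] at hvm
        have hcm : cursor + m < ids.length := by omega
        have : (cursor + m) ∈ occ := by
          rw [hoccdef, pvOccF_mem]
          exact ⟨cursor + m, hcm, by omega, hvm⟩
        obtain ⟨r, hr, hvr⟩ := List.mem_iff_getElem.1 this
        -- occ[r] = cursor + m < p = occ[lo]; sortedness forces r < lo, but then occ[r] < cursor
        have hrlo : r < lo := by
          by_contra hge
          have h1 : occ.getD lo 0 ≤ occ.getD r 0 := hmono lo r (by omega) hr
          rw [List.getD_eq_getElem _ _ hr, hvr, ← hpdef] at h1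
          omega
        have := hspec.2.2.1 r hrlo
        rw [List.getD_eq_getElem _ _ hr, hvr] at this
        omega
    rw [hidx]
    simp only [Option.map_some]
    congr 1
    omega

-- ---- B's loop equals the abstract loop ----

theorem pvPatLoop_eq_find (master : List (String × String)) (pat : List (String × String))
    (result : List String) (cursor : Nat) :
    pvPatLoop (pvIndexLoop master (PySem.Dict.empty, 0)).1 pat result cursor
      = pvLoopFind (master.map Prod.fst) result cursor pat := by
  induction pat generalizing result cursor with
  | nil => rfl
  | cons hd rest ih =>
    obtain ⟨sid, dist⟩ := hd
    have hstep := pvStep_eq_find master sid cursor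
    simp only at hstep
    rw [pvPatLoop, pvLoopFind, ← hstep]
    by_cases hlo : pvBsearch (((pvIndexLoop master (PySem.Dict.empty, 0)).1).getD sid [])
        cursor 0 (((pvIndexLoop master (PySem.Dict.empty, 0)).1).getD sid []).length
        = (((pvIndexLoop master (PySem.Dict.empty, 0)).1).getD sid []).length
    · simp only [if_pos hlo]
    · simp only [if_neg hlo]
      exact ih _ _

-- ===== VERDICT (by name: the statement is the Claim_ definition above) =====
theorem forward_match_pattern_to_master_spec : Claim_equal_forward_match_pattern_to_master := by
  intro pattern_stops master_stops _
  unfold Spec_forward_match_pattern_to_master forward_match_pattern_to_master forward_match_pattern_to_master_alt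
  rw [pvPatLoop_eq_find]
  simpa using pvLoopA_eq_find pattern_stops master_stops (List.replicate master_stops.length "") 0 0
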